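-- pv_equiv track=rewrite | github.com/Xp0intTeam/2024XSCTF-Internal | Crypto/For freshman/凯撒子撒子凯视眈眈/player/shika.py | s_hi_ka
-- ===== SOURCE A (Python) =====
-- import string
--
-- def s_hi_ka(text):
--     offset = 1
--     enc = ''
--     for w in text:
--         if w in string.ascii_letters:
--             enc += chr(ord(w) + offset)
--         else:
--             enc += w
--         offset *= -1
--     return enc
-- ===== SOURCE B (Python) =====
-- import string
--
-- def s_hi_ka(text):
--     letters = set(string.ascii_letters)
--     out = []
--     n = len(text)
--     i = 0
--     while i < n:
--         a = text[i]
--         out.append(chr(ord(a) + 1) if a in letters else a)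
--         if i + 1 < n:
--             b = text[i + 1]
--             out.append(chr(ord(b) - 1) if b in letters else b)
--         i += 2
--     return ''.join(out)
-- ===== Notes on version B (the rewrite author's own statement) =====
-- stated objective: alternative
-- what changed: Replaces the loop that threads a toggling offset state through every character by a loop that steps through the text two characters at a time, applying a fixed +1 shift to the first and a fixed -1 shift to the second of each pair, so no alternating state exists at all.
import Mathlib
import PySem

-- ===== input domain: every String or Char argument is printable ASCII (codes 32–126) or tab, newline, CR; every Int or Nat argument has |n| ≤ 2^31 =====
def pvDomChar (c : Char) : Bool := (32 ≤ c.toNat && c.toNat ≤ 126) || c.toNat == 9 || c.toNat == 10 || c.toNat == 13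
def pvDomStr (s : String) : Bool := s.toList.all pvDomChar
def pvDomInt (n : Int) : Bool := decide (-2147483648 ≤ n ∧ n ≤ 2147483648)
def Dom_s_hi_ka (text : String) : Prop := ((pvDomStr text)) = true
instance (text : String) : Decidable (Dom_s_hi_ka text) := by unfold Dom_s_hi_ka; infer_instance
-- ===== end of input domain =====

-- B removes the alternating state entirely: its loop steps two characters at a time,
-- shifting the first of each pair by +1 and the second by -1 (objective: alternative).

-- ===== PORT A =====
-- string.ascii_letters
def pvAsciiLetters : List Char :=
  "abcdefghijklmnopqrstuvwxyzABCDEFGHIJKLMNOPQRSTUVWXYZ".toList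

-- the for-loop of A: state = (offset, enc), toggling offset every iteration
def s_hi_ka_loop : List Char → Int → List Char → List Char
  | [], _, enc => enc
  | w :: ws, offset, enc =>
      s_hi_ka_loop ws (offset * (-1))
        (enc ++ [if w ∈ pvAsciiLetters then Char.ofNat ((w.toNat : Int) + offset).toNat else w])

def s_hi_ka (text : String) : String := String.mk (s_hi_ka_loop text.toList 1 [])

-- ===== PORT B =====
-- the two conditional shift expressions of Source B: fixed +1 / -1 shift on letters
def s_hi_ka_plus (c : Char) : Char :=
  if c ∈ pvAsciiLetters then Char.ofNat ((c.toNat : Int) + 1).toNat else c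

def s_hi_ka_minus (c : Char) : Char :=
  if c ∈ pvAsciiLetters then Char.ofNat ((c.toNat : Int) - 1).toNat else c

-- the while-loop of Source B: steps i by 2, emitting the +1-shifted first and -1-shifted
-- second character of each pair; transcribed as recursion consuming two list elements per step
def s_hi_ka_go : List Char → List Char
  | [] => []
  | [a] => [s_hi_ka_plus a]
  | a :: b :: rest => s_hi_ka_plus a :: s_hi_ka_minus b :: s_hi_ka_go rest

def s_hi_ka_alt (text : String) : String := String.mk (s_hi_ka_go text.toList)

-- ===== PRECONDITION & SPEC =====
def Spec_s_hi_ka (text : String) (out : String) : Prop := out = s_hi_ka_alt text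
instance (text : String) (out : String) : Decidable (Spec_s_hi_ka text out) := by unfold Spec_s_hi_ka; infer_instance

-- ===== CLAIM (what is proved, stated in full; the proofs are below) =====
def Claim_equal_s_hi_ka : Prop := ∀ (text : String), Dom_s_hi_ka text → Spec_s_hi_ka text (s_hi_ka text)

-- ===== LEMMAS AND PROOFS =====
theorem s_hi_ka_loop_eq : ∀ (ws enc : List Char),
    s_hi_ka_loop ws 1 enc = enc ++ s_hi_ka_go ws := by
  intro ws
  induction ws using s_hi_ka_go.induct with
  | case1 => intro enc; simp [s_hi_ka_loop, s_hi_ka_go]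
  | case2 a => intro enc; simp [s_hi_ka_loop, s_hi_ka_go, s_hi_ka_plus]
  | case3 a b rest ih =>
    intro enc
    have hb : (if b ∈ pvAsciiLetters then Char.ofNat ((b.toNat : Int) + -1).toNat else b)
        = s_hi_ka_minus b := by
      unfold s_hi_ka_minus
      split_ifs with h
      · rfl
      · rfl
    simp only [s_hi_ka_loop, s_hi_ka_go]
    norm_num
    rw [ih, hb]
    simp [s_hi_ka_plus]

-- ===== VERDICT (by name: the statement is the Claim_ definition above) =====
theorem s_hi_ka_spec : Claim_equal_s_hi_ka := by
  intro text _
  unfold Spec_s_hi_ka s_hi_ka s_hi_ka_alt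
  exact congrArg String.mk (by simpa using s_hi_ka_loop_eq text.toList [])
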